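-- pv_equiv track=rewrite | github.com/cli1903/mapreduce | similarities.py | mapper1
-- ===== SOURCE A (Python) =====
-- def mapper1(record):
--     # Hint:
--     # INPUT:
--     #   record: (key, values)
--     #     where -
--     #       key: movie_id
--     #       values: a list of values in the line
--     # OUTPUT:
--     #   [(key, value), (key, value), ...]
--     #     where -
--     #       key: movie_title
--     #       value: [(user_id, rating)]
--     #
--     # TODO
--     for i in record[1]:
--         if len(i) == 1:
--             movie_title = i[0]
--             break
--     for i in record[1]:
--         if len(i) == 2:
--             yield (movie_title, [i])
-- ===== SOURCE B (Python) =====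
-- def mapper1(record):
--     # single pass: remember first length-1 item as title, collect length-2 items
--     title = None
--     pending = []
--     for i in record[1]:
--         if len(i) == 1 and title is None:
--             title = i[0]
--         elif len(i) == 2:
--             pending.append(i)
--     return [(title, [p]) for p in pending]
-- ===== Notes on version B (the rewrite author's own statement) =====
-- stated objective: simpler
-- what changed: B makes a single pass over record[1] accumulating the first length-1 item as the title and the length-2 items in a pending list, instead of A's two separate scans (one to find the title, one to yield), and returns the result list directly instead of a generator.
import Mathlib
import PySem

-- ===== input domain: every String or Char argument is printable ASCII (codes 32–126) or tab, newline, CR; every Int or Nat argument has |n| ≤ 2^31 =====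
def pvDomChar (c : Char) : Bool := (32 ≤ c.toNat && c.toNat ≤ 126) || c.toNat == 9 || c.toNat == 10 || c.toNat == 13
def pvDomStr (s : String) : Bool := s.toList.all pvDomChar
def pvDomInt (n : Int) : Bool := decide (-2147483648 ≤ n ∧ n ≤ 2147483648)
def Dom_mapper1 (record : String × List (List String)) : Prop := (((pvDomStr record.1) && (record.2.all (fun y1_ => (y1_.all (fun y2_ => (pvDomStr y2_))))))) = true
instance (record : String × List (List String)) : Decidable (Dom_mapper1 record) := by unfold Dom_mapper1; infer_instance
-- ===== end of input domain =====

-- B makes ONE pass over record[1] (title + pending collected together) instead of A's two scans; return-value equivalence only (A is a generator).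

-- ===== PORT A =====
-- first loop of A: scan for the first length-1 item, movie_title = i[0], break
def mapper1Title : List (List String) → Option String
  | [] => none
  | i :: rest => if i.length = 1 then PySem.List.pyGet? i 0 else mapper1Title rest

def mapper1 (record : String × List (List String)) : List (String × List (List String)) :=
  match mapper1Title record.2 with
  | some t =>
      -- second loop of A: yield (movie_title, [i]) for each length-2 i
      record.2.foldl (fun acc i => if i.length = 2 then acc ++ [(t, [i])] else acc) []
  | none => []  -- movie_title unbound: A raises NameError at the first yield (excluded by Pre_); with no length-2 item A yields nothing

-- ===== PORT B =====
def mapper1_alt (record : String × List (List String)) : List (String × List (List String)) :=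
  let s := record.2.foldl
    (fun (s : Option String × List (List String)) i =>
      if i.length = 1 ∧ s.1 = none then (PySem.List.pyGet? i 0, s.2)
      else if i.length = 2 then (s.1, s.2 ++ [i])
      else s)
    (none, [])
  s.2.map (fun p => (s.1.getD "", [p]))  -- getD "": under Pre_, the title is present whenever pending ≠ []

-- ===== PRECONDITION & SPEC =====
-- Pre_ excludes exactly the inputs on which A raises NameError: no length-1 item to bind movie_title but at least one length-2 item to yield.
def Pre_mapper1 (record : String × List (List String)) : Prop :=
  (∃ i ∈ record.2, i.length = 1) ∨ (∀ i ∈ record.2, i.length ≠ 2)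
instance (record : String × List (List String)) : Decidable (Pre_mapper1 record) := by unfold Pre_mapper1; infer_instance
def pvWitness_mapper1 : (String × List (List String)) := ("7", [["Toy Story"], ["u1", "5"], ["u2", "3"]])
def Spec_mapper1 (record : String × List (List String)) (out : List (String × List (List String))) : Prop := out = mapper1_alt record
instance (record : String × List (List String)) (out : List (String × List (List String))) : Decidable (Spec_mapper1 record out) := by unfold Spec_mapper1; infer_instance

-- ===== CLAIM (what is proved, stated in full; the proofs are below) =====
def Claim_equal_mapper1 : Prop := ∀ (record : String × List (List String)), Dom_mapper1 record → Pre_mapper1 record → Spec_mapper1 record (mapper1 record)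

-- ===== LEMMAS AND PROOFS =====

-- A's second loop appends exactly the length-2 items, in order
theorem mapper1_foldA (t : String) :
    ∀ (l : List (List String)) (acc : List (String × List (List String))),
      l.foldl (fun acc i => if i.length = 2 then acc ++ [(t, [i])] else acc) acc
        = acc ++ (l.filter (fun i => i.length == 2)).map (fun i => (t, [i])) := by
  intro l
  induction l with
  | nil => intro acc; simp
  | cons i rest ih =>
    intro acc
    by_cases h : i.length = 2 <;> simp [List.foldl_cons, h, ih]

theorem pyGet?_len1 (i : List String) (h : i.length = 1) :
    ∃ x, i = [x] ∧ PySem.List.pyGet? i 0 = some x := by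
  match i, h with
  | [x], _ => exact ⟨x, rfl, PySem.List.pyGet?_zero_cons x []⟩

-- B's fold invariant
theorem mapper1_foldB :
    ∀ (l : List (List String)) (t? : Option String) (p : List (List String)),
      l.foldl
        (fun (s : Option String × List (List String)) i =>
          if i.length = 1 ∧ s.1 = none then (PySem.List.pyGet? i 0, s.2)
          else if i.length = 2 then (s.1, s.2 ++ [i])
          else s)
        (t?, p)
      = ((match t? with | some t => some t | none => mapper1Title l),
         p ++ l.filter (fun i => i.length == 2)) := by
  intro l
  induction l with
  | nil => intro t? p; cases t? <;> simp [mapper1Title]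
  | cons i rest ih =>
    intro t? p
    cases t? with
    | some t =>
      by_cases h : i.length = 2 <;>
        simp [List.foldl_cons, h, ih]
    | none =>
      by_cases h1 : i.length = 1
      · obtain ⟨x, hx, hg⟩ := pyGet?_len1 i h1
        have h2 : ¬ i.length = 2 := by omega
        simp [List.foldl_cons, h1, ih, mapper1Title]
      · by_cases h2 : i.length = 2 <;>
          simp [List.foldl_cons, h1, h2, ih, mapper1Title]

theorem mapper1Title_of_mem {l : List (List String)} {i : List String}
    (hm : i ∈ l) (h1 : i.length = 1) : ∃ t, mapper1Title l = some t := by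
  induction l with
  | nil => cases hm
  | cons j rest ih =>
    by_cases hj : j.length = 1
    · obtain ⟨x, hx, hg⟩ := pyGet?_len1 j hj
      exact ⟨x, by simp [mapper1Title, hx]⟩
    · rw [List.mem_cons] at hm
      rcases hm with hm | hm
      · exact absurd (hm ▸ h1) hj
      · obtain ⟨t, ht⟩ := ih hm
        exact ⟨t, by simp [mapper1Title, hj, ht]⟩

-- ===== VERDICT (by name: the statement is the Claim_ definition above) =====
theorem mapper1_spec : Claim_equal_mapper1 := by
  intro record _ hpre
  unfold Spec_mapper1 mapper1 mapper1_alt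
  rcases hpre with ⟨i, hm, h1⟩ | hno
  · obtain ⟨t, ht⟩ := mapper1Title_of_mem hm h1
    simp [ht, mapper1_foldA, mapper1_foldB]
  · have hfil : record.2.filter (fun i => i.length == 2) = [] := by
      rw [List.filter_eq_nil_iff]
      intro i hi
      simpa using hno i hi
    cases hmt : mapper1Title record.2 <;> simp [mapper1_foldA, mapper1_foldB, hfil]
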